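-- pv_equiv track=rewrite | github.com/hadinajem52/PrayerTimeApp | extract_prayer_times.py | validate_prayer_times
-- ===== SOURCE A (Python) =====
-- def validate_prayer_times(data):
--     """Validate that prayer times follow the expected sequence and format"""
--     if not data:
--         return False
--
--     # Check that all required fields exist
--     required_fields = ["fajr", "shuruq", "dhuhr", "asr", "maghrib", "isha"]
--     for field in required_fields:
--         if field not in data or not data[field]:
--             return False
--
--     # Simple validation that times are in expected sequence
--     # Convert times to minutes since midnight for comparison
--     try:
--         times = {}
--         for prayer in required_fields:
--             h, m = map(int, data[prayer].split(':'))
--             times[prayer] = h * 60 + m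
--
--         # Check sequence
--         return (times["fajr"] < times["shuruq"] < times["dhuhr"] <
--                 times["asr"] < times["maghrib"] < times["isha"])
--     except:
--         return False
-- ===== SOURCE B (Python) =====
-- def validate_prayer_times(data):
--     """Validate prayer time fields and ordering in a single streaming pass."""
--     if not data:
--         return False
--     prev = None
--     for field in ("fajr", "shuruq", "dhuhr", "asr", "maghrib", "isha"):
--         value = data.get(field)
--         if not value:
--             return False
--         try:
--             h, m = map(int, value.split(':'))
--         except:
--             return False
--         cur = h * 60 + m
--         if prev is not None and cur <= prev:
--             return False
--         prev = cur
--     return True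
-- ===== Notes on version B (the rewrite author's own statement) =====
-- stated objective: simpler
-- what changed: B replaces A's three phases (presence guard over all fields, dict-building parse loop, chained six-way comparison) with one streaming loop that checks presence, parses, and compares against a running prev in a single pass with early exit.
import Mathlib
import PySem

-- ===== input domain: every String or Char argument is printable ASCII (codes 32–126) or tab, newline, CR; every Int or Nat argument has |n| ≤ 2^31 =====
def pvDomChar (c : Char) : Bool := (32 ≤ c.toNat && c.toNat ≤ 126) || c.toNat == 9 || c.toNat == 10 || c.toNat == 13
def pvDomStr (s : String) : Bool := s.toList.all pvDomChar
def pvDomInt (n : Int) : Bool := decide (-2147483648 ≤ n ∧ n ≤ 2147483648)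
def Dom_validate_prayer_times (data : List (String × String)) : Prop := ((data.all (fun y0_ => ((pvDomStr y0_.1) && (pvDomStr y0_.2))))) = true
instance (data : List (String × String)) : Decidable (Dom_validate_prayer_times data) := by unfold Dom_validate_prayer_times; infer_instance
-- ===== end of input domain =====

-- B replaces A's three phases (presence guard, dict-building parse loop, chained comparison)
-- with one streaming loop keeping a running previous-time accumulator; objective: simpler.


-- ===== PORT A =====
def pvRequiredFields : List String := ["fajr", "shuruq", "dhuhr", "asr", "maghrib", "isha"]

-- h, m = map(int, s.split(':')); h*60+m   (none = the exceptions the bare except catches)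
def pvParseHM (s : String) : Option Int :=
  match PySem.Str.split? s ":" with
  | some [hs, ms] =>
    match PySem.Int.ofStr? hs, PySem.Int.ofStr? ms with
    | some h, some m => some (h * 60 + m)
    | _, _ => none
  | _ => none

def validate_prayer_times (data : List (String × String)) : Bool :=
  if data.isEmpty then false
  else if !(pvRequiredFields.all fun f =>
      match data.lookup f with
      | none => false
      | some v => !(v == "")) then false
  else
    let times? : Option (PySem.Dict String Int) :=
      pvRequiredFields.foldl (fun acc p =>
        match acc with
        | none => none
        | some t =>
          match pvParseHM ((data.lookup p).getD "") with
          | none => none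
          | some v => some (t.insert p v)) (some PySem.Dict.empty)
    match times? with
    | none => false
    | some t =>
      decide (t.getD "fajr" 0 < t.getD "shuruq" 0) &&
      decide (t.getD "shuruq" 0 < t.getD "dhuhr" 0) &&
      decide (t.getD "dhuhr" 0 < t.getD "asr" 0) &&
      decide (t.getD "asr" 0 < t.getD "maghrib" 0) &&
      decide (t.getD "maghrib" 0 < t.getD "isha" 0)

-- ===== PORT B =====
def pvSeqLoop (data : List (String × String)) (prev : Option Int) : List String → Bool
  | [] => true
  | f :: rest =>
    match data.lookup f with
    | none => false
    | some v =>
      if v == "" then false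
      else
        match pvParseHM v with
        | none => false
        | some cur =>
          match prev with
          | some p => if cur ≤ p then false else pvSeqLoop data (some cur) rest
          | none => pvSeqLoop data (some cur) rest

def validate_prayer_times_alt (data : List (String × String)) : Bool :=
  if data.isEmpty then false else pvSeqLoop data none pvRequiredFields

-- ===== PRECONDITION & SPEC =====
def Spec_validate_prayer_times (data : List (String × String)) (out : Bool) : Prop := out = validate_prayer_times_alt data
instance (data : List (String × String)) (out : Bool) : Decidable (Spec_validate_prayer_times data out) := by unfold Spec_validate_prayer_times; infer_instance

-- ===== CLAIM (what is proved, stated in full; the proofs are below) =====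
def Claim_equal_validate_prayer_times : Prop := ∀ (data : List (String × String)), Dom_validate_prayer_times data → Spec_validate_prayer_times data (validate_prayer_times data)

-- ===== LEMMAS AND PROOFS =====

-- ===== VERDICT (by name: the statement is the Claim_ definition above) =====
set_option maxHeartbeats 1000000 in
theorem validate_prayer_times_spec : Claim_equal_validate_prayer_times := by
  intro data _
  unfold Spec_validate_prayer_times validate_prayer_times validate_prayer_times_alt pvRequiredFields
  by_cases hd : data.isEmpty = true
  · simp [hd]
  · simp only [hd, if_false, Bool.false_eq_true]
    cases h1 : data.lookup "fajr" with
    | none => simp [pvSeqLoop, h1]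
    | some v1 =>
      by_cases e1 : v1 = ""
      · simp [pvSeqLoop, h1, e1]
      · have e1' : (v1 == "") = false := beq_eq_false_iff_ne.mpr e1
        cases p1 : pvParseHM v1 with
        | none => simp [pvSeqLoop, h1, e1', p1]
        | some n1 =>
          cases h2 : data.lookup "shuruq" with
          | none => simp [pvSeqLoop, h1, e1', p1, h2]
          | some v2 =>
            by_cases e2 : v2 = ""
            · simp [pvSeqLoop, h1, e1', p1, h2, e2]
            · have e2' : (v2 == "") = false := beq_eq_false_iff_ne.mpr e2
              cases p2 : pvParseHM v2 with
              | none => simp [pvSeqLoop, h1, e1', p1, h2, e2', p2]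
              | some n2 =>
                cases h3 : data.lookup "dhuhr" with
                | none => simp [pvSeqLoop, h1, e1', p1, h2, e2', p2, h3]
                | some v3 =>
                  by_cases e3 : v3 = ""
                  · simp [pvSeqLoop, h1, e1', p1, h2, e2', p2, h3, e3]
                  · have e3' : (v3 == "") = false := beq_eq_false_iff_ne.mpr e3
                    cases p3 : pvParseHM v3 with
                    | none => simp [pvSeqLoop, h1, e1', p1, h2, e2', p2, h3, e3', p3]
                    | some n3 =>
                      cases h4 : data.lookup "asr" with
                      | none => simp [pvSeqLoop, h1, e1', p1, h2, e2', p2, h3, e3', p3, h4]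
                      | some v4 =>
                        by_cases e4 : v4 = ""
                        · simp [pvSeqLoop, h1, e1', p1, h2, e2', p2, h3, e3', p3, h4, e4]
                        · have e4' : (v4 == "") = false := beq_eq_false_iff_ne.mpr e4
                          cases p4 : pvParseHM v4 with
                          | none => simp [pvSeqLoop, h1, e1', p1, h2, e2', p2, h3, e3', p3, h4, e4', p4]
                          | some n4 =>
                            cases h5 : data.lookup "maghrib" with
                            | none => simp [pvSeqLoop, h1, e1', p1, h2, e2', p2, h3, e3', p3, h4, e4', p4, h5]
                            | some v5 =>
                              by_cases e5 : v5 = ""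
                              · simp [pvSeqLoop, h1, e1', p1, h2, e2', p2, h3, e3', p3, h4, e4', p4, h5, e5]
                              · have e5' : (v5 == "") = false := beq_eq_false_iff_ne.mpr e5
                                cases p5 : pvParseHM v5 with
                                | none => simp [pvSeqLoop, h1, e1', p1, h2, e2', p2, h3, e3', p3, h4, e4', p4, h5, e5', p5]
                                | some n5 =>
                                  cases h6 : data.lookup "isha" with
                                  | none => simp [pvSeqLoop, h1, e1', p1, h2, e2', p2, h3, e3', p3, h4, e4', p4, h5, e5', p5, h6]
                                  | some v6 =>
                                    by_cases e6 : v6 = ""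
                                    · simp [pvSeqLoop, h1, e1', p1, h2, e2', p2, h3, e3', p3, h4, e4', p4, h5, e5', p5, h6, e6]
                                    · have e6' : (v6 == "") = false := beq_eq_false_iff_ne.mpr e6
                                      cases p6 : pvParseHM v6 with
                                      | none => simp [pvSeqLoop, h1, e1', p1, h2, e2', p2, h3, e3', p3, h4, e4', p4, h5, e5', p5, h6, e6', p6]
                                      | some n6 =>
                                        simp [pvSeqLoop, h1, e1', p1, h2, e2', p2, h3, e3', p3, h4, e4', p4, h5, e5', p5, h6, e6', p6, PySem.Dict.getD_insert]
                                        simp only [← decide_not, not_le]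
                                        simp [Bool.and_assoc]
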